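-- pv_equiv track=rewrite | github.com/Nighthawk42/Dungeo_ai | dungeon ai.py | remove_last_ai_response
-- ===== SOURCE A (Python) =====
-- def remove_last_ai_response(conversation):
--     """
--     Removes the last AI response from the conversation string.
--     Assumes conversation alternates between Player: ... and Dungeon Master: ...
--     """
--     lines = conversation.strip().split('\n')
--
--     last_dm_index = None
--     for i in range(len(lines) - 1, -1, -1):
--         if lines[i].startswith("Dungeon Master:"):
--             last_dm_index = i
--             break
--     if last_dm_index is None:
--         return conversation
--
--     next_player_index = None
--     for i in range(last_dm_index + 1, len(lines)):
--         if lines[i].startswith("Player:"):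
--             next_player_index = i
--             break
--
--     if next_player_index is None:
--         new_lines = lines[:last_dm_index]
--     else:
--         new_lines = lines[:last_dm_index] + lines[next_player_index:]
--
--     return '\n'.join(new_lines).strip()
-- ===== SOURCE B (Python) =====
-- def remove_last_ai_response(conversation):
--     """
--     Removes the last AI response from the conversation string.
--     Groups lines into message blocks (a block starts at a 'Player:' or
--     'Dungeon Master:' line), drops the last Dungeon-Master block.
--     """
--     lines = conversation.strip().split('\n')
--     blocks = []
--     cur = []
--     for line in lines:
--         if line.startswith("Player:") or line.startswith("Dungeon Master:"):
--             if cur: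
--                 blocks.append(cur)
--             cur = [line]
--         else:
--             cur.append(line)
--     if cur:
--         blocks.append(cur)
--
--     last_dm = None
--     for i, block in enumerate(blocks):
--         if block[0].startswith("Dungeon Master:"):
--             last_dm = i
--     if last_dm is None:
--         return conversation
--
--     del blocks[last_dm]
--     return '\n'.join(line for block in blocks for line in block).strip()
-- ===== Notes on version B (the rewrite author's own statement) =====
-- stated objective: alternative
-- what changed: Instead of A's backward scan for the last Dungeon-Master line plus a forward scan for the next Player line and two slices, B groups the lines in one forward pass into message blocks (a block starts at each marker line), deletes the last Dungeon-Master-headed block and flattens the remaining blocks.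
import Mathlib
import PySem

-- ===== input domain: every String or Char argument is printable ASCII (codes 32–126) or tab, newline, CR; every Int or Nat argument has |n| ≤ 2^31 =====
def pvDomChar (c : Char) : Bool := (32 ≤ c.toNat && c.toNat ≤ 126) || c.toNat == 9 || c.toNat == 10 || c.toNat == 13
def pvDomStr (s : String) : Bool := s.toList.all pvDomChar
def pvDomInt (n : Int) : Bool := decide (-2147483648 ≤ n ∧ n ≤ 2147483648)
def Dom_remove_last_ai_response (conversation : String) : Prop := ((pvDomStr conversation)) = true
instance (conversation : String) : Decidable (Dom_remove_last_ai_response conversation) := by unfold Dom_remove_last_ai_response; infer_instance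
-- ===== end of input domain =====

-- B rewrites A's reverse-scan + forward-scan + slice as a one-pass grouping into
-- message blocks followed by deletion of the last Dungeon-Master block (objective:
-- alternative decomposition, same asymptotic cost).

-- ===== PORT A =====
-- A's two index-scanning `for i in range(...)` loops with `break` share one shape:
-- walk an index list, return the first index whose line satisfies the predicate.
def pvA_scan (p : String → Bool) (lines : List String) : List Int → Option Int
  | [] => none
  | i :: rest =>
      if p ((PySem.List.pyGet? lines i).getD "") then some i
      else pvA_scan p lines rest

-- `lines[:last_dm_index]` / `lines[:last_dm_index] + lines[next_player_index:]`
def pvA_newLines (lines : List String) (d : Int) : Option Int → List String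
  | none => PySem.List.slice lines none (some d)
  | some p => PySem.List.slice lines none (some d) ++ PySem.List.slice lines (some p) none

-- the code after the `if last_dm_index is None` early return
def pvA_finish (conversation : String) (lines : List String) : Option Int → String
  | none => conversation
  | some d =>
      PySem.Str.strip (PySem.Str.join "\n"
        (pvA_newLines lines d
          (pvA_scan (fun l => PySem.Str.startswith l "Player:") lines
            (PySem.List.pyRange (d + 1) (lines.length : Int) 1))))

def pvA_core (conversation : String) (lines : List String) : String :=
  pvA_finish conversation lines
    (pvA_scan (fun l => PySem.Str.startswith l "Dungeon Master:") lines
      (PySem.List.pyRange ((lines.length : Int) - 1) (-1) (-1)))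

def remove_last_ai_response (conversation : String) : String :=
  pvA_core conversation ((PySem.Str.split? (PySem.Str.strip conversation) "\n").getD [])

-- ===== PORT B =====
-- one step of B's grouping loop: a marker line flushes the current block and starts a new one
def pvB_step (st : List (List String) × List String) (line : String) : List (List String) × List String :=
  if PySem.Str.startswith line "Player:" || PySem.Str.startswith line "Dungeon Master:" then
    (if st.2 ≠ [] then st.1 ++ [st.2] else st.1, [line])
  else (st.1, st.2 ++ [line])

-- the code after the `if last_dm is None` early return: delete block `i`, flatten, join, strip
def pvB_finish (conversation : String) (blocks : List (List String)) : Option Int → String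
  | none => conversation
  | some i =>
      PySem.Str.strip (PySem.Str.join "\n"
        (((PySem.List.pop? blocks i).map Prod.snd).getD []).flatten)

def pvB_core (conversation : String) (lines : List String) : String :=
  let st := lines.foldl pvB_step ([], [])
  let blocks := st.1 ++ (if st.2 ≠ [] then [st.2] else [])
  pvB_finish conversation blocks
    ((PySem.List.enumerate blocks).foldl
      (fun acc p =>
        if PySem.Str.startswith ((PySem.List.pyGet? p.2 0).getD "") "Dungeon Master:" then some p.1
        else acc) none)

def remove_last_ai_response_alt (conversation : String) : String :=
  pvB_core conversation ((PySem.Str.split? (PySem.Str.strip conversation) "\n").getD [])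

-- ===== PRECONDITION & SPEC =====
def Spec_remove_last_ai_response (conversation : String) (out : String) : Prop := out = remove_last_ai_response_alt conversation
instance (conversation : String) (out : String) : Decidable (Spec_remove_last_ai_response conversation out) := by unfold Spec_remove_last_ai_response; infer_instance

-- ===== CLAIM (what is proved, stated in full; the proofs are below) =====
def Claim_equal_remove_last_ai_response : Prop := ∀ (conversation : String), Dom_remove_last_ai_response conversation → Spec_remove_last_ai_response conversation (remove_last_ai_response conversation)

-- ===== LEMMAS AND PROOFS =====

-- abbreviations for the two markers
def pvIsDM (l : String) : Bool := PySem.Str.startswith l "Dungeon Master:"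
def pvIsP (l : String) : Bool := PySem.Str.startswith l "Player:"
def pvIsM (l : String) : Bool := pvIsP l || pvIsDM l

-- ---- generic decomposition lemmas ----

-- last element satisfying p
theorem pv_last_decomp {α : Type} (p : α → Bool) :
    ∀ (l : List α), (∃ x ∈ l, p x = true) →
      ∃ pre y suf, l = pre ++ y :: suf ∧ p y = true ∧ ∀ x ∈ suf, p x = false := by
  intro l
  induction l with
  | nil => rintro ⟨x, hx, _⟩; exact absurd hx (List.not_mem_nil)
  | cons a l ih =>
      intro hex
      by_cases h : ∃ x ∈ l, p x = true
      · obtain ⟨pre, y, suf, h1, h2, h3⟩ := ih h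
        exact ⟨a :: pre, y, suf, by simp [h1], h2, h3⟩
      · obtain ⟨x, hx, hpx⟩ := hex
        have hpa : p a = true := by
          rcases List.mem_cons.mp hx with h' | h'
          · exact h' ▸ hpx
          · exact absurd ⟨x, h', hpx⟩ h
        refine ⟨[], a, l, rfl, hpa, ?_⟩
        intro x hx'
        by_contra hc
        exact h ⟨x, hx', by simpa using hc⟩

-- first element satisfying p, or none
theorem pv_first_decomp {α : Type} (p : α → Bool) :
    ∀ (l : List α), (∀ x ∈ l, p x = false) ∨
      ∃ pre y suf, l = pre ++ y :: suf ∧ p y = true ∧ ∀ x ∈ pre, p x = false := by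
  intro l
  induction l with
  | nil => left; simp
  | cons a l ih =>
      by_cases hpa : p a = true
      · right; exact ⟨[], a, l, rfl, hpa, by simp⟩
      · rcases ih with h | ⟨pre, y, suf, h1, h2, h3⟩
        · left; intro x hx
          rcases List.mem_cons.mp hx with h' | h'
          · subst h'; simpa using hpa
          · exact h x h'
        · right
          refine ⟨a :: pre, y, suf, by simp [h1], h2, ?_⟩
          intro x hx
          rcases List.mem_cons.mp hx with h' | h'
          · subst h'; simpa using hpa
          · exact h3 x h'

-- ---- A-side scan lemmas ----

def pvGet (lines : List String) (i : Int) : String := (PySem.List.pyGet? lines i).getD ""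

theorem pvA_scan_none (p : String → Bool) (lines : List String) :
    ∀ idxs : List Int, (∀ i ∈ idxs, p (pvGet lines i) = false) →
      pvA_scan p lines idxs = none := by
  intro idxs
  induction idxs with
  | nil => intro _; rfl
  | cons i rest ih =>
      intro h
      have hi := h i (by simp)
      simp only [pvA_scan, pvGet] at *
      rw [hi]
      simp only [Bool.false_eq_true, if_false]
      exact ih (fun j hj => h j (by simp [hj]))

theorem pvA_scan_append (p : String → Bool) (lines : List String)
    (xs ys : List Int) (h : ∀ i ∈ xs, p (pvGet lines i) = false) :
    pvA_scan p lines (xs ++ ys) = pvA_scan p lines ys := by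
  induction xs with
  | nil => rfl
  | cons i rest ih =>
      have hi := h i (by simp)
      simp only [List.cons_append, pvA_scan, pvGet] at *
      rw [hi]
      simp only [Bool.false_eq_true, if_false]
      exact ih (fun j hj => h j (by simp [hj]))

theorem pvA_scan_hit (p : String → Bool) (lines : List String)
    (i : Int) (rest : List Int) (h : p (pvGet lines i) = true) :
    pvA_scan p lines (i :: rest) = some i := by
  unfold pvA_scan
  rw [show ((PySem.List.pyGet? lines i).getD "") = pvGet lines i from rfl, h]
  simp

-- pvGet at a valid natural index is the list element
theorem pvGet_natCast (lines : List String) (k : Nat) (h : k < lines.length) :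
    pvGet lines (k : Int) = lines[k] := by
  simp [pvGet, PySem.List.pyGet?_natCast, List.getElem?_eq_getElem h]

-- ---- B-side fold lemmas ----

theorem pvB_step_marker (st : List (List String) × List String) (a : String)
    (hm : (PySem.Str.startswith a "Player:" || PySem.Str.startswith a "Dungeon Master:") = true) :
    pvB_step st a = (if st.2 ≠ [] then st.1 ++ [st.2] else st.1, [a]) := by
  simp only [pvB_step, hm]
  simp

theorem pvB_step_plain (st : List (List String) × List String) (a : String)
    (hm : (PySem.Str.startswith a "Player:" || PySem.Str.startswith a "Dungeon Master:") = false) :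
    pvB_step st a = (st.1, st.2 ++ [a]) := by
  simp only [pvB_step, hm]
  simp


-- a run without marker lines only extends the current block
theorem pvB_run_no_marker (xs : List String) (h : ∀ x ∈ xs, pvIsM x = false) :
    ∀ st : List (List String) × List String,
      xs.foldl pvB_step st = (st.1, st.2 ++ xs) := by
  induction xs with
  | nil => intro st; simp
  | cons a xs ih =>
      intro st
      have ha : pvIsM a = false := h a (by simp)
      simp only [List.foldl_cons]
      rw [pvB_step_plain st a (by simpa [pvIsM, pvIsP, pvIsDM] using ha)]
      rw [ih (fun x hx => h x (by simp [hx])) (st.1, st.2 ++ [a])]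
      simp

-- already-finished blocks are only appended to
theorem pvB_prefix (xs : List String) :
    ∀ (B C : List (List String)) (cur : List String),
      xs.foldl pvB_step (B ++ C, cur) =
        (B ++ (xs.foldl pvB_step (C, cur)).1, (xs.foldl pvB_step (C, cur)).2) := by
  induction xs with
  | nil => intro B C cur; simp
  | cons a xs ih =>
      intro B C cur
      simp only [List.foldl_cons]
      rcases Bool.eq_false_or_eq_true (PySem.Str.startswith a "Player:" || PySem.Str.startswith a "Dungeon Master:") with hm | hm
      · by_cases hc : cur = []
        · subst hc
          rw [pvB_step_marker (B ++ C, ([] : List String)) a hm,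
              pvB_step_marker (C, ([] : List String)) a hm]
          have e : ∀ (C : List (List String)),
              (if ([] : List String) ≠ [] then C ++ [([] : List String)] else C) = C := by
            intro C; simp
          rw [e, e]
          exact ih B C [a]
        · rw [pvB_step_marker (B ++ C, cur) a hm, pvB_step_marker (C, cur) a hm]
          simp only [ne_eq, hc, not_false_eq_true, if_true]
          rw [List.append_assoc]
          exact ih B (C ++ [cur]) [a]
      · rw [pvB_step_plain (B ++ C, cur) a hm, pvB_step_plain (C, cur) a hm]
        exact ih B C (cur ++ [a])

-- every line in the fold's state comes from the initial state or the input
theorem pvB_mem (xs : List String) :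
    ∀ (st : List (List String) × List String) (x : String),
      ((∃ b ∈ (xs.foldl pvB_step st).1, x ∈ b) ∨ x ∈ (xs.foldl pvB_step st).2) →
      (∃ b ∈ st.1, x ∈ b) ∨ x ∈ st.2 ∨ x ∈ xs := by
  induction xs with
  | nil =>
      intro st x h
      simp only [List.foldl_nil] at h
      rcases h with h | h
      · exact Or.inl h
      · exact Or.inr (Or.inl h)
  | cons a xs ih =>
      intro st x h
      simp only [List.foldl_cons] at h
      have := ih (pvB_step st a) x h
      rcases this with ⟨b, hb, hxb⟩ | hx | hx
      · -- b is a finished block of pvB_step st a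
        simp only [pvB_step] at hb
        split at hb
        · split at hb
          · rcases List.mem_append.mp hb with h' | h'
            · exact Or.inl ⟨b, h', hxb⟩
            · simp at h'
              subst h'
              exact Or.inr (Or.inl hxb)
          · exact Or.inl ⟨b, hb, hxb⟩
        · exact Or.inl ⟨b, hb, hxb⟩
      · -- x is in the current block of pvB_step st a
        simp only [pvB_step] at hx
        split at hx
        · simp at hx; subst hx; simp
        · rcases List.mem_append.mp hx with h' | h'
          · exact Or.inr (Or.inl h')
          · simp at h'; subst h'; simp
      · exact Or.inr (Or.inr (by simp [hx]))

-- flattening the state reproduces the input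
theorem pvB_flatten (xs : List String) :
    ∀ st : List (List String) × List String,
      (xs.foldl pvB_step st).1.flatten ++ (xs.foldl pvB_step st).2 =
        st.1.flatten ++ st.2 ++ xs := by
  induction xs with
  | nil => intro st; simp
  | cons a xs ih =>
      intro st
      simp only [List.foldl_cons]
      rw [ih (pvB_step st a)]
      simp only [pvB_step]
      split
      · split
        · simp
        · next hc => simp at hc; simp [hc]
      · simp

-- the flushed blocks of a fold flatten to the initial data plus the input
theorem pvB_flatten_flush (xs : List String) (st : List (List String) × List String) :
    ((xs.foldl pvB_step st).1 ++
      (if (xs.foldl pvB_step st).2 ≠ [] then [(xs.foldl pvB_step st).2] else [])).flatten =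
      st.1.flatten ++ st.2 ++ xs := by
  rw [← pvB_flatten xs st]
  split
  · simp
  · next h => simp at h; simp [h]

-- ---- the last-DM-block fold ----

def pvB_dmFold (acc : Option Int) (bs : List (Int × List String)) : Option Int :=
  bs.foldl (fun acc p =>
    if PySem.Str.startswith ((PySem.List.pyGet? p.2 0).getD "") "Dungeon Master:" then some p.1
    else acc) acc

theorem pvB_dmFold_none (bs : List (List String)) :
    ∀ (s : Int) (acc : Option Int),
      (∀ b ∈ bs, pvIsDM ((PySem.List.pyGet? b 0).getD "") = false) →
      pvB_dmFold acc (PySem.List.enumerate bs s) = acc := by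
  induction bs with
  | nil => intro s acc _; rfl
  | cons b bs ih =>
      intro s acc h
      rw [PySem.List.enumerate_cons]
      have hb := h b (by simp)
      simp only [pvB_dmFold, List.foldl_cons] at *
      rw [show (if PySem.Str.startswith ((PySem.List.pyGet? b 0).getD "") "Dungeon Master:" then some s else acc) = acc by
        simp [pvIsDM] at hb; simp [hb]]
      exact ih (s + 1) acc (fun b' hb' => h b' (by simp [hb']))

-- ---- heads of blocks are lines ----

theorem pv_head_mem (b : List String) (hne : b ≠ []) :
    ((PySem.List.pyGet? b 0).getD "") ∈ b := by
  cases b with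
  | nil => exact absurd rfl hne
  | cons a b =>
      have h : PySem.List.pyGet? (a :: b) 0 = some a := by
        simp [PySem.List.pyGet?, PySem.List.pyIdx?]
      rw [h]
      simp

-- ---- index/element helpers ----

theorem pvGet_mem_of_lt (lines : List String) (i : Int) (h0 : 0 ≤ i)
    (h1 : i < (lines.length : Int)) : pvGet lines i ∈ lines := by
  have hk : i.toNat < lines.length := by omega
  rw [show i = (i.toNat : Int) by omega, pvGet_natCast lines i.toNat hk]
  exact List.getElem_mem hk

theorem pvGet_mid (L1 L2 L3 : List String) (i : Int)
    (h1 : (L1.length : Int) ≤ i) (h2 : i < (L1.length : Int) + (L2.length : Int)) :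
    pvGet (L1 ++ L2 ++ L3) i ∈ L2 := by
  have h3 : L1.length ≤ i.toNat := by omega
  have h4 : i.toNat - L1.length < L2.length := by omega
  have hk : i.toNat < (L1 ++ (L2 ++ L3)).length := by simp; omega
  rw [show i = (i.toNat : Int) by omega, List.append_assoc, pvGet_natCast _ i.toNat hk]
  rw [List.getElem_append_right h3]
  rw [List.getElem_append_left h4]
  exact List.getElem_mem _

theorem pvGet_at (L1 : List String) (x : String) (L2 : List String) :
    pvGet (L1 ++ x :: L2) (L1.length : Int) = x := by
  have hk : L1.length < (L1 ++ x :: L2).length := by simp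
  rw [pvGet_natCast _ L1.length hk]
  rw [List.getElem_append_right (le_refl _)]
  simp

-- ---- dmFold: last DM-headed block wins ----

theorem pvB_dmFold_last (B0 : List (List String)) (blk : List String)
    (B2 : List (List String)) (acc : Option Int)
    (hblk : pvIsDM ((PySem.List.pyGet? blk 0).getD "") = true)
    (h2 : ∀ b ∈ B2, pvIsDM ((PySem.List.pyGet? b 0).getD "") = false) :
    pvB_dmFold acc (PySem.List.enumerate (B0 ++ blk :: B2)) = some (B0.length : Int) := by
  rw [show (B0 ++ blk :: B2) = B0 ++ [blk] ++ B2 by simp]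
  rw [PySem.List.enumerate_append, PySem.List.enumerate_append]
  simp only [pvB_dmFold, List.foldl_append]
  rw [show (PySem.List.enumerate [blk] (0 + (B0.length : Int))) = [((B0.length : Int), blk)] by
    simp [PySem.List.enumerate_cons, PySem.List.enumerate_nil]]
  simp only [List.foldl_cons, List.foldl_nil]
  rw [show (if PySem.Str.startswith ((PySem.List.pyGet? blk 0).getD "") "Dungeon Master:"
        then some (B0.length : Int)
        else (List.foldl _ acc (PySem.List.enumerate B0 0))) = some (B0.length : Int) by
    simp [pvIsDM] at hblk; simp [hblk]]
  have := pvB_dmFold_none B2 (0 + (B0.length : Int) + 1) (some (B0.length : Int)) h2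
  simpa [pvB_dmFold] using this

-- heads of blocks built from DM-free lines are DM-free
theorem pvB_heads (xs init : List String)
    (h : ∀ x, (x ∈ init ∨ x ∈ xs) → pvIsDM x = false) :
    ∀ b ∈ (xs.foldl pvB_step ([], init)).1 ++
        (if (xs.foldl pvB_step ([], init)).2 ≠ [] then [(xs.foldl pvB_step ([], init)).2] else []),
      pvIsDM ((PySem.List.pyGet? b 0).getD "") = false := by
  intro b hb
  by_cases hne : b = []
  · subst hne; decide
  · have hx : ((PySem.List.pyGet? b 0).getD "") ∈ b := pv_head_mem b hne
    have hmem : (∃ c ∈ (xs.foldl pvB_step ([], init)).1, ((PySem.List.pyGet? b 0).getD "") ∈ c) ∨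
        ((PySem.List.pyGet? b 0).getD "") ∈ (xs.foldl pvB_step ([], init)).2 := by
      rcases List.mem_append.mp hb with h' | h'
      · exact Or.inl ⟨b, h', hx⟩
      · split at h'
        · simp at h'; subst h'; exact Or.inr hx
        · simp at h'
    have := pvB_mem xs ([], init) _ hmem
    rcases this with ⟨c, hc, _⟩ | h' | h'
    · simp at hc
    · exact h _ (Or.inl h')
    · exact h _ (Or.inr h')

theorem pv_pyGet0 (a : String) (b : List String) :
    (PySem.List.pyGet? (a :: b) 0).getD "" = a := by
  simp [PySem.List.pyGet?, PySem.List.pyIdx?]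

-- flatten of the first component after a marker step
theorem pv_flatten_ite (st1 : List String) (B : List (List String)) :
    (if st1 ≠ [] then B ++ [st1] else B).flatten = B.flatten ++ st1 := by
  split
  · simp
  · next h => simp at h; simp [h]

-- ===== the main list-level lemma =====

theorem pv_main (conv : String) (lines : List String) :
    pvA_core conv lines = pvB_core conv lines := by
  by_cases hdm : ∃ x ∈ lines, pvIsDM x = true
  · -- there is a Dungeon Master line: decompose around the last one
    obtain ⟨pre, dm, suf, hlines, hdmT, hsuf⟩ := pv_last_decomp pvIsDM lines hdm
    have hlen : lines.length = pre.length + 1 + suf.length := by simp [hlines]; omega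
    have hdmT' : PySem.Str.startswith dm "Dungeon Master:" = true := hdmT
    have hmark : (PySem.Str.startswith dm "Player:" || PySem.Str.startswith dm "Dungeon Master:") = true := by
      rw [show PySem.Str.startswith dm "Dungeon Master:" = true from hdmT', Bool.or_true]
    -- A's reverse scan finds index pre.length
    have hA1 : pvA_scan (fun l => PySem.Str.startswith l "Dungeon Master:") lines
        (PySem.List.pyRange ((lines.length : Int) - 1) (-1) (-1)) = some (pre.length : Int) := by
      rw [PySem.List.pyRange_neg_one_eq_reverse]
      rw [show ((-1 : Int) + 1) = 0 from rfl,
          show ((lines.length : Int) - 1 + 1) = (lines.length : Int) by ring]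
      rw [PySem.List.pyRange_one_append 0 ((pre.length : Int) + 1) (lines.length : Int)
            (by omega) (by omega)]
      rw [List.reverse_append]
      rw [pvA_scan_append _ _ _ _ ?hskip]
      case hskip =>
        intro i hi
        rw [List.mem_reverse, PySem.List.mem_pyRange_one] at hi
        have hmem : pvGet lines i ∈ suf := by
          rw [hlines, show pre ++ dm :: suf = (pre ++ [dm]) ++ suf ++ [] by simp]
          exact pvGet_mid (pre ++ [dm]) suf [] i (by simp; omega) (by simp; omega)
        exact hsuf _ hmem
      rw [PySem.List.pyRange_one_succ_right (a := 0) (b := (pre.length : Int)) (by omega)]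
      rw [List.reverse_append]
      rw [show [(pre.length : Int)].reverse = [(pre.length : Int)] from rfl]
      rw [List.singleton_append]
      apply pvA_scan_hit
      show PySem.Str.startswith (pvGet lines (pre.length : Int)) "Dungeon Master:" = true
      rw [hlines, pvGet_at pre dm suf]
      exact hdmT'
    -- B's fold through pre and the dm line
    have hfold1 : lines.foldl pvB_step ([], []) =
        (dm :: suf).foldl pvB_step (pre.foldl pvB_step ([], [])) := by
      rw [hlines, List.foldl_append]
    have hB0flat :
        (if (pre.foldl pvB_step ([], [])).2 ≠ [] then
            (pre.foldl pvB_step ([], [])).1 ++ [(pre.foldl pvB_step ([], [])).2]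
          else (pre.foldl pvB_step ([], [])).1).flatten = pre := by
      rw [pv_flatten_ite]
      have := pvB_flatten pre ([], [])
      simpa using this
    rcases pv_first_decomp pvIsP suf with hP | ⟨mid, pl, rest, hsplit, hplP, hmidP⟩
    · -- no Player line after the last DM line: drop everything from it on
      have hnomark : ∀ x ∈ suf, pvIsM x = false := by
        intro x hx
        simp [pvIsM, hP x hx, hsuf x hx]
      have hA2 : pvA_scan (fun l => PySem.Str.startswith l "Player:") lines
          (PySem.List.pyRange ((pre.length : Int) + 1) (lines.length : Int) 1) = none := by
        apply pvA_scan_none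
        intro i hi
        rw [PySem.List.mem_pyRange_one] at hi
        have hmem : pvGet lines i ∈ suf := by
          rw [hlines, show pre ++ dm :: suf = (pre ++ [dm]) ++ suf ++ [] by simp]
          exact pvGet_mid (pre ++ [dm]) suf [] i (by simp; omega) (by simp; omega)
        exact hP _ hmem
      have hfold2 : lines.foldl pvB_step ([], []) =
          ((if (pre.foldl pvB_step ([], [])).2 ≠ [] then
              (pre.foldl pvB_step ([], [])).1 ++ [(pre.foldl pvB_step ([], [])).2]
            else (pre.foldl pvB_step ([], [])).1), dm :: suf) := by
        rw [hfold1, List.foldl_cons, pvB_step_marker _ dm hmark]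
        rw [pvB_run_no_marker suf hnomark]
        simp
      simp only [pvA_core, pvB_core, hfold2]
      rw [hA1]
      simp only [pvA_finish]
      rw [hA2]
      simp only [pvA_newLines]
      simp only [ne_eq, reduceCtorEq, not_false_eq_true, if_pos]
      rw [show ((PySem.List.enumerate
          ((if (pre.foldl pvB_step ([], [])).2 ≠ [] then
              (pre.foldl pvB_step ([], [])).1 ++ [(pre.foldl pvB_step ([], [])).2]
            else (pre.foldl pvB_step ([], [])).1) ++ [dm :: suf])).foldl
          (fun acc p =>
            if PySem.Str.startswith ((PySem.List.pyGet? p.2 0).getD "") "Dungeon Master:" then some p.1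
            else acc) none) = some (((if (pre.foldl pvB_step ([], [])).2 ≠ [] then
              (pre.foldl pvB_step ([], [])).1 ++ [(pre.foldl pvB_step ([], [])).2]
            else (pre.foldl pvB_step ([], [])).1).length : Int)) from
        pvB_dmFold_last _ (dm :: suf) [] none (by rw [pv_pyGet0]; exact hdmT) (by simp)]
      simp only [pvB_finish]
      rw [PySem.List.pop?_natCast _ _ (by simp)]
      rw [PySem.List.slice_to lines (by omega)]
      simp only [Option.map_some, Option.getD_some, Int.toNat_natCast]
      rw [List.eraseIdx_append_of_length_le (le_refl _)]
      simp only [Nat.sub_self, List.eraseIdx_cons_zero, List.append_nil]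
      rw [hB0flat, hlines, List.take_left]
    · -- there is a Player line after the last DM line
      have hmemsuf : ∀ x, (x ∈ mid ∨ x = pl ∨ x ∈ rest) → x ∈ suf := by
        intro x hx
        rw [hsplit]
        rcases hx with h | h | h
        · exact List.mem_append.mpr (Or.inl h)
        · exact List.mem_append.mpr (Or.inr (by simp [h]))
        · exact List.mem_append.mpr (Or.inr (by simp [h]))
      have hmidM : ∀ x ∈ mid, pvIsM x = false := by
        intro x hx
        simp [pvIsM, hmidP x hx, hsuf x (hmemsuf x (Or.inl hx))]
      have hplM : (PySem.Str.startswith pl "Player:" || PySem.Str.startswith pl "Dungeon Master:") = true := by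
        rw [show PySem.Str.startswith pl "Player:" = true from hplP, Bool.true_or]
      have hlen2 : lines.length = pre.length + 1 + mid.length + 1 + rest.length := by
        rw [hlen, hsplit]; simp; omega
      have hshape : lines = (pre ++ dm :: mid) ++ pl :: rest := by
        rw [hlines, hsplit]; simp
      have hA2 : pvA_scan (fun l => PySem.Str.startswith l "Player:") lines
          (PySem.List.pyRange ((pre.length : Int) + 1) (lines.length : Int) 1) =
          some (((pre ++ dm :: mid).length : Int)) := by
        rw [PySem.List.pyRange_one_append ((pre.length : Int) + 1)
              (((pre ++ dm :: mid).length : Int)) (lines.length : Int)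
              (by simp <;> omega) (by simp <;> omega)]
        rw [pvA_scan_append _ _ _ _ ?hskipP]
        case hskipP =>
          intro i hi
          rw [PySem.List.mem_pyRange_one] at hi
          have hmem : pvGet lines i ∈ mid := by
            rw [hlines, hsplit, show pre ++ dm :: (mid ++ pl :: rest) = (pre ++ [dm]) ++ mid ++ (pl :: rest) by simp]
            refine pvGet_mid (pre ++ [dm]) mid (pl :: rest) i (by simp; omega) ?_
            simp at hi ⊢
            omega
          exact hmidP _ hmem
        rw [PySem.List.pyRange_one_cons (by simp [hlen2]; omega)]
        apply pvA_scan_hit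
        show PySem.Str.startswith (pvGet lines ((pre ++ dm :: mid).length : Int)) "Player:" = true
        rw [hshape, pvGet_at (pre ++ dm :: mid) pl rest]
        exact hplP
      -- B's fold through pre, dm, mid, pl and rest
      have hfold2 : lines.foldl pvB_step ([], []) =
          (((if (pre.foldl pvB_step ([], [])).2 ≠ [] then
                (pre.foldl pvB_step ([], [])).1 ++ [(pre.foldl pvB_step ([], [])).2]
              else (pre.foldl pvB_step ([], [])).1) ++ [dm :: mid]) ++
              (rest.foldl pvB_step ([], [pl])).1,
            (rest.foldl pvB_step ([], [pl])).2) := by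
        rw [hfold1, List.foldl_cons, pvB_step_marker _ dm hmark]
        rw [hsplit, List.foldl_append]
        rw [pvB_run_no_marker mid hmidM]
        simp only [List.singleton_append, List.foldl_cons]
        rw [pvB_step_marker _ pl hplM]
        simp only [ne_eq, reduceCtorEq, not_false_eq_true, if_pos]
        rw [show ((if (pre.foldl pvB_step ([], [])).2 ≠ [] then
                (pre.foldl pvB_step ([], [])).1 ++ [(pre.foldl pvB_step ([], [])).2]
              else (pre.foldl pvB_step ([], [])).1) ++ [dm :: mid]) =
            (((if (pre.foldl pvB_step ([], [])).2 ≠ [] then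
                (pre.foldl pvB_step ([], [])).1 ++ [(pre.foldl pvB_step ([], [])).2]
              else (pre.foldl pvB_step ([], [])).1) ++ [dm :: mid]) ++ []) by simp]
        rw [pvB_prefix rest _ [] [pl]]
        simp
      simp only [pvA_core, pvB_core, hfold2]
      rw [hA1]
      simp only [pvA_finish]
      rw [hA2]
      simp only [pvA_newLines]
      rw [List.append_assoc (if (pre.foldl pvB_step ([], [])).2 ≠ [] then
              (pre.foldl pvB_step ([], [])).1 ++ [(pre.foldl pvB_step ([], [])).2]
            else (pre.foldl pvB_step ([], [])).1) [dm :: mid], List.singleton_append,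
          List.append_assoc, List.cons_append]
      rw [show ((PySem.List.enumerate
          ((if (pre.foldl pvB_step ([], [])).2 ≠ [] then
              (pre.foldl pvB_step ([], [])).1 ++ [(pre.foldl pvB_step ([], [])).2]
            else (pre.foldl pvB_step ([], [])).1) ++ (dm :: mid) ::
              ((rest.foldl pvB_step ([], [pl])).1 ++
                (if (rest.foldl pvB_step ([], [pl])).2 ≠ [] then [(rest.foldl pvB_step ([], [pl])).2] else [])))).foldl
          (fun acc p =>
            if PySem.Str.startswith ((PySem.List.pyGet? p.2 0).getD "") "Dungeon Master:" then some p.1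
            else acc) none) = some (((if (pre.foldl pvB_step ([], [])).2 ≠ [] then
              (pre.foldl pvB_step ([], [])).1 ++ [(pre.foldl pvB_step ([], [])).2]
            else (pre.foldl pvB_step ([], [])).1).length : Int)) from
        pvB_dmFold_last _ (dm :: mid) _ none (by rw [pv_pyGet0]; exact hdmT)
          (pvB_heads rest [pl] (fun x hx => hsuf x (hmemsuf x (by
            rcases hx with h | h
            · simp at h; exact Or.inr (Or.inl h)
            · exact Or.inr (Or.inr h)))))]
      simp only [pvB_finish]
      rw [PySem.List.pop?_natCast _ _ (by simp)]
      simp only [Option.map_some, Option.getD_some, Int.toNat_natCast]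
      rw [List.eraseIdx_append_of_length_le (le_refl _)]
      simp only [Nat.sub_self, List.eraseIdx_cons_zero]
      rw [PySem.List.slice_to lines (by omega), PySem.List.slice_from lines (by omega)]
      simp only [Int.toNat_natCast]
      rw [List.flatten_append, hB0flat, pvB_flatten_flush]
      rw [show lines.take pre.length = pre by rw [hlines]; exact List.take_left]
      rw [show lines.drop (pre ++ dm :: mid).length = pl :: rest by rw [hshape]; exact List.drop_left]
      simp
  · -- no Dungeon Master line: both sides return conv
    push_neg at hdm
    have hall : ∀ x ∈ lines, pvIsDM x = false := by
      intro x hx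
      exact Bool.eq_false_iff.mpr (fun h => (hdm x hx) h)
    have hA : pvA_scan (fun l => PySem.Str.startswith l "Dungeon Master:") lines
        (PySem.List.pyRange ((lines.length : Int) - 1) (-1) (-1)) = none := by
      apply pvA_scan_none
      intro i hi
      rw [PySem.List.mem_pyRange_neg_one] at hi
      exact hall _ (pvGet_mem_of_lt lines i (by omega) (by omega))
    have hB : pvB_dmFold none (PySem.List.enumerate
        ((lines.foldl pvB_step ([], [])).1 ++
          (if (lines.foldl pvB_step ([], [])).2 ≠ [] then [(lines.foldl pvB_step ([], [])).2] else []))) = none := by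
      rw [show (PySem.List.enumerate
          ((lines.foldl pvB_step ([], [])).1 ++
            (if (lines.foldl pvB_step ([], [])).2 ≠ [] then [(lines.foldl pvB_step ([], [])).2] else []))) =
          (PySem.List.enumerate
          ((lines.foldl pvB_step ([], [])).1 ++
            (if (lines.foldl pvB_step ([], [])).2 ≠ [] then [(lines.foldl pvB_step ([], [])).2] else [])) 0) from rfl]
      apply pvB_dmFold_none
      exact pvB_heads lines [] (fun x hx => hall x (hx.elim (fun h => absurd h (List.not_mem_nil)) id))
    simp only [pvA_core, pvB_core]
    rw [hA]
    rw [show ((PySem.List.enumerate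
        ((lines.foldl pvB_step ([], [])).1 ++
          (if (lines.foldl pvB_step ([], [])).2 ≠ [] then [(lines.foldl pvB_step ([], [])).2] else []))).foldl
        (fun acc p =>
          if PySem.Str.startswith ((PySem.List.pyGet? p.2 0).getD "") "Dungeon Master:" then some p.1
          else acc) none) = (none : Option Int) from hB]
    rfl

-- ===== VERDICT (by name: the statement is the Claim_ definition above) =====
theorem remove_last_ai_response_spec : Claim_equal_remove_last_ai_response := by
  intro conversation _
  show remove_last_ai_response conversation = remove_last_ai_response_alt conversation
  unfold remove_last_ai_response remove_last_ai_response_alt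
  exact pv_main conversation _
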